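-- pv_equiv track=rewrite | github.com/bgr/adventofcode | 15.py | calc
-- ===== SOURCE A (Python) =====
-- def calc(ingredients, max_scoop=100, acc_score=(0, 0, 0, 0)):
--     if not ingredients:
--         return [acc_score]
--
--     ing, rest_ings = ingredients[0], ingredients[1:]
--
--     scores = []
--     for scoop in range(max_scoop + 1):
--         ing_score = tuple(scoop * n for n in ing)
--         new_acc_score = tuple(a + i for a, i in zip(ing_score, acc_score))
--         rest_scores = calc(rest_ings, max_scoop - scoop, new_acc_score)
--         for s in rest_scores:
--             scores.append(s)
--
--     return scores
-- ===== SOURCE B (Python) =====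
-- def calc(ingredients, max_scoop=100, acc_score=(0, 0, 0, 0)):
--     # Iterative worklist: one pass over the ingredients, expanding every
--     # partial state (remaining_budget, accumulated_score) in order.
--     states = [(max_scoop, acc_score)]
--     for ing in ingredients:
--         states = [(budget - scoop,
--                    tuple(scoop * n + a for n, a in zip(ing, acc)))
--                   for budget, acc in states
--                   for scoop in range(budget + 1)]
--     return [acc for _, acc in states]
-- ===== Notes on version B (the rewrite author's own statement) =====
-- stated objective: alternative
-- what changed: Replaces the recursion over the ingredient list by an iterative left-to-right worklist of partial (budget, score) states expanded one ingredient at a time with list comprehensions.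
import Mathlib
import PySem

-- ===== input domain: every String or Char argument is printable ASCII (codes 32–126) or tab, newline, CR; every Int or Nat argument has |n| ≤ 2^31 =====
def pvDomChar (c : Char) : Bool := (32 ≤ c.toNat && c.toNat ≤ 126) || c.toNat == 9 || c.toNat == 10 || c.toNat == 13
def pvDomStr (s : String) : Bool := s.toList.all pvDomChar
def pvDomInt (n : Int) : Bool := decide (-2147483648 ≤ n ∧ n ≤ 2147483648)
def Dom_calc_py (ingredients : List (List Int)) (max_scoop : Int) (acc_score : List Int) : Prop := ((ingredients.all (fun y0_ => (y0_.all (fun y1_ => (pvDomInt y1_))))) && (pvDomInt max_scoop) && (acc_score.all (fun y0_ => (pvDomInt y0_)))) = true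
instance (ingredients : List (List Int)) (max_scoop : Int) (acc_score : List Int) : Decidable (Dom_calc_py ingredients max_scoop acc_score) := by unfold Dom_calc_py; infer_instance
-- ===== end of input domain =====

-- B replaces A's recursion over the ingredient list by an iterative worklist of
-- partial (budget, score) states, expanded one ingredient at a time (alternative decomposition).

-- ===== PORT A =====
def calc_py (ingredients : List (List Int)) (max_scoop : Int) (acc_score : List Int) : List (List Int) :=
  match ingredients with
  | [] => [acc_score]
  | ing :: rest_ings =>
    (PySem.List.pyRange 0 (max_scoop + 1) 1).foldl (fun scores scoop =>
      let ing_score := ing.map (fun n => scoop * n)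
      let new_acc_score := (ing_score.zip acc_score).map (fun p => p.1 + p.2)
      let rest_scores := calc_py rest_ings (max_scoop - scoop) new_acc_score
      rest_scores.foldl (fun sc s => sc ++ [s]) scores) []

-- ===== PORT B =====
def calc_py_alt (ingredients : List (List Int)) (max_scoop : Int) (acc_score : List Int) : List (List Int) :=
  (ingredients.foldl (fun states ing =>
      states.flatMap (fun st =>
        (PySem.List.pyRange 0 (st.1 + 1) 1).map (fun scoop =>
          (st.1 - scoop, (ing.zip st.2).map (fun p => scoop * p.1 + p.2)))))
    [(max_scoop, acc_score)]).map (fun st => st.2)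

-- ===== PRECONDITION & SPEC =====
def Spec_calc_py (ingredients : List (List Int)) (max_scoop : Int) (acc_score : List Int) (out : List (List Int)) : Prop := out = calc_py_alt ingredients max_scoop acc_score
instance (ingredients : List (List Int)) (max_scoop : Int) (acc_score : List Int) (out : List (List Int)) : Decidable (Spec_calc_py ingredients max_scoop acc_score out) := by unfold Spec_calc_py; infer_instance

-- ===== CLAIM (what is proved, stated in full; the proofs are below) =====
def Claim_equal_calc_py : Prop := ∀ (ingredients : List (List Int)) (max_scoop : Int) (acc_score : List Int), Dom_calc_py ingredients max_scoop acc_score → Spec_calc_py ingredients max_scoop acc_score (calc_py ingredients max_scoop acc_score)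

-- ===== LEMMAS AND PROOFS =====

-- A's two score updates compute the same list.
theorem pv_zipmap (ing acc : List Int) (sc : Int) :
    ((ing.map (fun n => sc * n)).zip acc).map (fun p => p.1 + p.2)
      = (ing.zip acc).map (fun p => sc * p.1 + p.2) := by
  rw [List.zip_map_left]
  simp [Function.comp]

-- A's recursive step, written as a flatMap over the scoop range.
theorem calc_py_cons (ing : List Int) (rest : List (List Int)) (m : Int) (acc : List Int) :
    calc_py (ing :: rest) m acc
      = (PySem.List.pyRange 0 (m + 1) 1).flatMap (fun sc =>
          calc_py rest (m - sc) ((ing.zip acc).map (fun p => sc * p.1 + p.2))) := by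
  show (PySem.List.pyRange 0 (m + 1) 1).foldl _ [] = _
  have h : ∀ (sc : Int) (scores : List (List Int)),
      (calc_py rest (m - sc) (((ing.map (fun n => sc * n)).zip acc).map (fun p => p.1 + p.2))).foldl
          (fun sc' s => sc' ++ [s]) scores
        = scores ++ calc_py rest (m - sc) ((ing.zip acc).map (fun p => sc * p.1 + p.2)) := by
    intro sc scores
    rw [PySem.List.foldl_append_singleton_eq_self, pv_zipmap]
  simp only [h]
  rw [PySem.List.foldl_append_eq_flatMap]
  simp

-- Worklist invariant: folding B's expansion over the ingredients and projecting
-- the scores equals running A from every state of the worklist, in order.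
theorem pv_worklist (ings : List (List Int)) :
    ∀ (states : List (Int × List Int)),
      ((ings.foldl (fun states ing =>
          states.flatMap (fun st =>
            (PySem.List.pyRange 0 (st.1 + 1) 1).map (fun scoop =>
              (st.1 - scoop, (ing.zip st.2).map (fun p => scoop * p.1 + p.2))))) states).map
        (fun st => st.2))
      = states.flatMap (fun st => calc_py ings st.1 st.2) := by
  induction ings with
  | nil =>
    intro states
    simp only [List.foldl_nil, calc_py]
    induction states with
    | nil => rfl
    | cons s t iht => simp [iht]
  | cons ing rest ih =>
    intro states
    rw [List.foldl_cons, ih]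
    rw [List.flatMap_assoc]
    simp only [List.flatMap_map]
    apply List.flatMap_congr
    intro st _
    rw [calc_py_cons]

-- ===== VERDICT (by name: the statement is the Claim_ definition above) =====
theorem calc_py_spec : Claim_equal_calc_py := by
  intro ings m acc _
  show calc_py ings m acc = calc_py_alt ings m acc
  unfold calc_py_alt
  rw [pv_worklist]
  simp
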